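-- pv_equiv track=rewrite | github.com/ste-getrude/recettes | receipy_url/common/.ipynb_checkpoints/comm_class-checkpoint.py | get_ingredient_details
-- ===== SOURCE A (Python) =====
-- def get_ingredient_details(str_list:list):
--     """
--     Looks for the strings "(" and ")" in the list, and store their position in a list.
--     if the strings can be found in 2 positions in the list, removes all intermediary position and joins
--     them together and retruns the str
--
--     Return:
--
--         str: The ingredient details
--
--     """
--     # check if parenthesis
--     # position = [i if ("(" in s or ")" in s) else None for i, s in enumerate(str_list)]
--     parenthese_range = [i for i, s in enumerate(str_list) if ("(" in s or ")" in s)]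
--     if len(parenthese_range) == 2:
--         individual_detail_list = []
--         correction = 0 # the correction is because the index changes at every pop operation
--         for elem_index in range(parenthese_range[0], parenthese_range[1]+1):
--             individual_detail_list.append(str_list.pop(elem_index - correction))
--             correction += 1
--         return " ".join(individual_detail_list)
--     elif len(parenthese_range) == 1:
--         return str_list.pop(parenthese_range[0])
--     else:
--         return None
-- ===== SOURCE B (Python) =====
-- # B: one-pass scan keeping (first, last, count) instead of building the index list,
-- # then a single slice + block delete instead of the index-corrected pop loop.
-- # Mutates str_list the same way A does (same elements removed).
-- def get_ingredient_details(str_list: list):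
--     first = -1
--     last = -1
--     count = 0
--     for i, s in enumerate(str_list):
--         if "(" in s or ")" in s:
--             if first < 0:
--                 first = i
--             last = i
--             count += 1
--     if count == 2:
--         segment = str_list[first:last + 1]
--         del str_list[first:last + 1]
--         return " ".join(segment)
--     elif count == 1:
--         return str_list.pop(first)
--     else:
--         return None
-- ===== Notes on version B (the rewrite author's own statement) =====
-- stated objective: simpler
-- what changed: Replaces A's materialized index list plus index-corrected pop loop by a single (first, last, count) scan and one slice + block delete; same return values and same list mutation.
import Mathlib
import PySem

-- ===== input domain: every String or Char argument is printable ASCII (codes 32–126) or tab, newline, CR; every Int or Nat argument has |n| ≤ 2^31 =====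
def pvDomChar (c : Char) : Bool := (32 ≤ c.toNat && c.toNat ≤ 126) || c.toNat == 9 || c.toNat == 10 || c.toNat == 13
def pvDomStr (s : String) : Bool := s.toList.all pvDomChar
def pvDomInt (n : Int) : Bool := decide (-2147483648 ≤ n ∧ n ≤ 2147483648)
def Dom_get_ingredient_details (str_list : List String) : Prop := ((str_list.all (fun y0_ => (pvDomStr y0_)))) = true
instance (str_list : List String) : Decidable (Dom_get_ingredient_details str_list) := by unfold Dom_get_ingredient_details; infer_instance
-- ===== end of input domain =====

-- B replaces A's index-list comprehension and index-corrected pop loop by a one-pass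
-- (first, last, count) scan plus a single slice (objective: simpler). Both Pythons mutate
-- str_list identically; the equivalence proved here is about the RETURN value only.

-- ===== PORT A =====
-- '"(" in s or ")" in s'
def pvParen (s : String) : Bool := PySem.Str.isIn "(" s || PySem.Str.isIn ")" s

-- A's pop loop over range(pr[0], pr[1]+1) with the correction counter;
-- none = the (unreachable) IndexError of a pop out of range
def pvPopLoop : List Int → List String → List String → Int → Option (List String × List String)
  | [], acc, l, _ => some (acc, l)
  | i :: rest, acc, l, c =>
    match PySem.List.pop? l (i - c) with
    | none => none
    | some (v, l') => pvPopLoop rest (acc ++ [v]) l' (c + 1)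

def get_ingredient_details (str_list : List String) : Option String :=
  let parenthese_range : List Int :=
    ((PySem.List.enumerate str_list 0).filter (fun p => pvParen p.2)).map (·.1)
  if parenthese_range.length = 2 then
    match pvPopLoop
        (PySem.List.pyRange (PySem.List.pyGetD parenthese_range 0 (-1))
          (PySem.List.pyGetD parenthese_range 1 (-1) + 1) 1)
        [] str_list 0 with
    | none => none
    | some (individual_detail_list, _) => some (PySem.Str.join " " individual_detail_list)
  else if parenthese_range.length = 1 then
    (PySem.List.pop? str_list (PySem.List.pyGetD parenthese_range 0 (-1))).map (·.1)
  else none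

-- ===== PORT B =====
def pvScanStep (st : Int × Int × Int) (p : Int × String) : Int × Int × Int :=
  if pvParen p.2 then ((if st.1 < 0 then p.1 else st.1), p.1, st.2.2 + 1) else st

-- the for-loop of Source B: (first, last, count)
def pvScan (str_list : List String) : Int × Int × Int :=
  (PySem.List.enumerate str_list 0).foldl pvScanStep (-1, -1, 0)

def get_ingredient_details_alt (str_list : List String) : Option String :=
  let st := pvScan str_list
  if st.2.2 = 2 then
    some (PySem.Str.join " " (PySem.List.slice str_list (some st.1) (some (st.2.1 + 1))))
  else if st.2.2 = 1 then
    (PySem.List.pop? str_list st.1).map (·.1)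
  else none

-- ===== PRECONDITION & SPEC =====
def Spec_get_ingredient_details (str_list : List String) (out : Option String) : Prop := out = get_ingredient_details_alt str_list
instance (str_list : List String) (out : Option String) : Decidable (Spec_get_ingredient_details str_list out) := by unfold Spec_get_ingredient_details; infer_instance

-- ===== CLAIM (what is proved, stated in full; the proofs are below) =====
def Claim_equal_get_ingredient_details : Prop := ∀ (str_list : List String), Dom_get_ingredient_details str_list → Spec_get_ingredient_details str_list (get_ingredient_details str_list)

-- ===== LEMMAS AND PROOFS =====

-- the scan with a fixed (nonnegative) first accumulates last/count over the matches
theorem pvScanStep_foldl_pos (ps : List (Int × String)) :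
    ∀ (f0 l0 : Int) (c0 : Int), 0 ≤ f0 →
      ps.foldl pvScanStep (f0, l0, c0) =
        (f0, ((ps.filter (fun p => pvParen p.2)).map (·.1)).getLastD l0,
          c0 + ((ps.filter (fun p => pvParen p.2)).map (·.1)).length) := by
  induction ps with
  | nil => intro f0 l0 c0 h; simp
  | cons p ps ih =>
    intro f0 l0 c0 h
    rw [List.foldl_cons]
    by_cases hp : pvParen p.2
    · have hstep : pvScanStep (f0, l0, c0) p = (f0, p.1, c0 + 1) := by
        simp [pvScanStep, hp, show ¬ f0 < 0 by omega]
      rw [hstep, ih f0 p.1 (c0 + 1) h]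
      simp only [List.filter_cons, hp, if_true]
      simp only [List.map_cons, List.getLastD_cons, List.length_cons, Prod.mk.injEq]
      refine ⟨trivial, trivial, by push_cast; ring⟩
    · have hstep : pvScanStep (f0, l0, c0) p = (f0, l0, c0) := by
        simp [pvScanStep, hp]
      rw [hstep, ih f0 l0 c0 h]
      simp only [List.filter_cons, hp, if_false, Bool.false_eq_true]

theorem pvScanStep_foldl_neg (ps : List (Int × String)) (l0 c0 : Int)
    (hps : ∀ p ∈ ps, 0 ≤ p.1) :
    ps.foldl pvScanStep (-1, l0, c0) =
      (((ps.filter (fun p => pvParen p.2)).map (·.1)).headD (-1),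
        ((ps.filter (fun p => pvParen p.2)).map (·.1)).getLastD l0,
        c0 + ((ps.filter (fun p => pvParen p.2)).map (·.1)).length) := by
  induction ps generalizing l0 c0 with
  | nil => simp
  | cons p ps ih =>
    rw [List.foldl_cons]
    by_cases hp : pvParen p.2
    · have h0 : (0:Int) ≤ p.1 := hps p (by simp)
      have hstep : pvScanStep (-1, l0, c0) p = (p.1, p.1, c0 + 1) := by
        simp [pvScanStep, hp]
      rw [hstep, pvScanStep_foldl_pos ps p.1 p.1 (c0 + 1) h0]
      simp only [List.filter_cons, hp, if_true]
      simp only [List.map_cons, List.getLastD_cons, List.headD_cons, List.length_cons,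
        Prod.mk.injEq]
      refine ⟨trivial, trivial, by push_cast; ring⟩
    · have hstep : pvScanStep (-1, l0, c0) p = (-1, l0, c0) := by
        simp [pvScanStep, hp]
      rw [hstep, ih l0 c0 (fun q hq => hps q (by simp [hq]))]
      simp only [List.filter_cons, hp, if_false, Bool.false_eq_true]

-- pvScan in terms of A's parenthese_range
theorem pvScan_eq (l : List String) :
    pvScan l =
      ((((PySem.List.enumerate l 0).filter (fun p => pvParen p.2)).map (·.1)).headD (-1),
        (((PySem.List.enumerate l 0).filter (fun p => pvParen p.2)).map (·.1)).getLastD (-1),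
        ((((PySem.List.enumerate l 0).filter (fun p => pvParen p.2)).map (·.1)).length : Int)) := by
  unfold pvScan
  rw [pvScanStep_foldl_neg]
  · simp
  · intro p hp
    rcases (PySem.List.mem_enumerate_iff _ _ _).1 hp with ⟨k, hk, rfl⟩
    simp

-- A's pop loop over a contiguous range equals take of drop (pops always hit index a)
theorem pvPopLoop_slice (n : Nat) :
    ∀ (l acc : List String) (m : Nat) (c : Int), m + n ≤ l.length →
      pvPopLoop (PySem.List.pyRange ((m : Int) + c) ((m : Int) + c + n) 1) acc l c =
        some (acc ++ (l.drop m).take n, l.take m ++ l.drop (m + n)) := by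
  induction n with
  | zero =>
    intro l acc m c h
    simp only [Nat.cast_zero]
    rw [show ((m : Int) + c + 0) = (m : Int) + c by ring,
      PySem.List.pyRange_one_eq_nil (le_refl _)]
    simp [pvPopLoop]
  | succ n ih =>
    intro l acc m c h
    have hm : m < l.length := by omega
    rw [PySem.List.pyRange_one_cons (by push_cast; omega)]
    simp only [pvPopLoop]
    rw [show ((m : Int) + c - c) = (m : Int) by ring, PySem.List.pop?_natCast l m hm]
    have hrange : (m : Int) + c + 1 = (m : Int) + (c + 1) := by ring
    have hrange2 : (m : Int) + c + (n + 1 : Nat) = (m : Int) + (c + 1) + (n : Nat) := by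
      push_cast; ring
    rw [hrange, hrange2]
    dsimp only
    rw [ih (l.eraseIdx m) (acc ++ [l[m]]) m (c + 1)
      (by rw [List.length_eraseIdx_of_lt hm]; omega)]
    have he : l.eraseIdx m = l.take m ++ l.drop (m + 1) := List.eraseIdx_eq_take_drop_succ l m
    have hlt : (l.take m).length = m := List.length_take_of_le (le_of_lt hm)
    congr 1
    refine congrArg₂ Prod.mk ?_ (congrArg₂ (· ++ ·) ?_ ?_)
    · -- acc ++ [l[m]] ++ take n (drop m (eraseIdx)) = acc ++ take (n+1) (drop m l)
      have hd : (l.eraseIdx m).drop m = l.drop (m + 1) := by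
        rw [he, List.drop_append, hlt]
        simp
      rw [hd, List.append_assoc]
      congr 1
      have : l.drop m = l[m] :: l.drop (m + 1) := List.drop_eq_getElem_cons hm
      rw [this, List.take_succ_cons]
      rfl
    · rw [he, List.take_append, hlt]
      simp
    · rw [he, List.drop_append, hlt]
      have h1 : List.drop (m + n) (List.take m l) = [] := by
        apply List.drop_eq_nil_of_le; rw [hlt]; omega
      rw [h1, List.nil_append, List.drop_drop]
      congr 1
      omega

-- membership in parenthese_range gives a Nat index below the length
theorem pv_mem_range (l : List String) (a : Int)
    (ha : a ∈ ((PySem.List.enumerate l 0).filter (fun p => pvParen p.2)).map (·.1)) :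
    ∃ k : Nat, k < l.length ∧ a = (k : Int) := by
  rcases List.mem_map.1 ha with ⟨p, hp, rfl⟩
  rcases (PySem.List.mem_enumerate_iff _ _ _).1 (List.mem_of_mem_filter hp) with ⟨k, hk, rfl⟩
  exact ⟨k, hk, by simp⟩

theorem pv_range_sorted (l : List String) :
    (((PySem.List.enumerate l 0).filter (fun p => pvParen p.2)).map (·.1)).Pairwise (· < ·) := by
  exact List.pairwise_map.2 ((PySem.List.pairwise_lt_enumerate l 0).filter _)

-- ===== VERDICT (by name: the statement is the Claim_ definition above) =====
theorem get_ingredient_details_spec : Claim_equal_get_ingredient_details := by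
  intro l _
  unfold Spec_get_ingredient_details get_ingredient_details get_ingredient_details_alt
  rw [pvScan_eq]
  have hsorted := pv_range_sorted l
  have hmem := pv_mem_range l
  generalize hpr : ((PySem.List.enumerate l 0).filter (fun p => pvParen p.2)).map (·.1) = pr
    at hsorted hmem ⊢
  match pr with
  | [a, b] =>
    -- two-match branch
    rcases hmem a (by simp) with ⟨ka, hka, rfl⟩
    rcases hmem b (by simp) with ⟨kb, hkb, rfl⟩
    have hab : (ka : Int) < (kb : Int) := (List.pairwise_cons.1 hsorted).1 _ (by simp)
    have hkab : ka ≤ kb := by exact_mod_cast le_of_lt hab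
    have hg0 : PySem.List.pyGetD [(ka : Int), (kb : Int)] 0 (-1) = (ka : Int) := by
      simp [PySem.List.pyGetD, PySem.List.pyIdx?, PySem.List.pyGet?]
    have hg1 : PySem.List.pyGetD [(ka : Int), (kb : Int)] 1 (-1) = (kb : Int) := by
      simp [PySem.List.pyGetD, PySem.List.pyIdx?, PySem.List.pyGet?]
    rw [if_pos (show [(ka : Int), (kb : Int)].length = 2 by norm_num),
      if_pos (show (([(ka : Int), (kb : Int)].length : Nat) : Int) = 2 by norm_num),
      hg0, hg1]
    simp only [List.headD_cons, List.getLastD_cons, List.getLastD_nil]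
    rw [PySem.List.slice_toNat _ (by omega) (by omega), Int.toNat_natCast,
      show ((kb : Int) + 1).toNat = kb + 1 by omega]
    have hn : (kb : Int) + 1 = (ka : Int) + 0 + ((kb + 1 - ka : Nat) : Int) := by
      omega
    rw [show ((ka : Int)) = (ka : Int) + 0 from by ring, hn,
      pvPopLoop_slice (kb + 1 - ka) l [] ka 0 (by omega)]
    dsimp only
    simp only [List.nil_append]
  | [a] =>
    rcases hmem a (by simp) with ⟨ka, hka, rfl⟩
    simp [PySem.List.pyGetD, PySem.List.pyIdx?, PySem.List.pyGet?]
  | [] => simp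
  | a :: b :: c :: rest =>
    have h2 : (a :: b :: c :: rest).length ≠ 2 := by simp
    have h1 : (a :: b :: c :: rest).length ≠ 1 := by simp
    rw [if_neg h2, if_neg h1]
    have h2' : ((a :: b :: c :: rest).length : Int) ≠ 2 := by
      exact_mod_cast fun h => h2 (by exact_mod_cast h)
    have h1' : ((a :: b :: c :: rest).length : Int) ≠ 1 := by
      exact_mod_cast fun h => h1 (by exact_mod_cast h)
    rw [if_neg h2', if_neg h1']
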